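-- pv_equiv track=rewrite | github.com/DenisKarev/Python_sem | Task_5_02.py | gen_progressions
-- ===== SOURCE A (Python) =====
-- def gen_progressions(li: list):
--     res_list = []
--     for i in range(len(li)):
--         comp = li[i]
--         lis1 =[comp]
--         for j in range(i + 1, len(li)):
--             if li[j] > comp:
--                 comp = li[j]
--                 lis1.append(comp)
--         if len(lis1) > 1:
--             res_list.append(lis1)
--     return res_list
-- ===== SOURCE B (Python) =====
-- def gen_progressions(li: list):
--     res_list = []
--     for i in range(len(li)):
--         suf = li[i:]
--         # pass 1: running-maximum table of the suffix
--         acc = suf[:1]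
--         for x in suf[1:]:
--             acc.append(max(acc[-1], x))
--         # pass 2: keep the start plus every point where the running max strictly rose
--         seq = suf[:1] + [q for p, q in zip(acc, acc[1:]) if q > p]
--         if len(seq) > 1:
--             res_list.append(seq)
--     return res_list
-- ===== Notes on version B (the rewrite author's own statement) =====
-- stated objective: alternative
-- what changed: A's fused greedy loop (compare each element with a running comp and append in place) is replaced by a two-phase pipeline per start index: first build the suffix's running-maximum table, then a separate selection pass keeps the start plus each point where the table strictly rose.
import Mathlib
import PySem

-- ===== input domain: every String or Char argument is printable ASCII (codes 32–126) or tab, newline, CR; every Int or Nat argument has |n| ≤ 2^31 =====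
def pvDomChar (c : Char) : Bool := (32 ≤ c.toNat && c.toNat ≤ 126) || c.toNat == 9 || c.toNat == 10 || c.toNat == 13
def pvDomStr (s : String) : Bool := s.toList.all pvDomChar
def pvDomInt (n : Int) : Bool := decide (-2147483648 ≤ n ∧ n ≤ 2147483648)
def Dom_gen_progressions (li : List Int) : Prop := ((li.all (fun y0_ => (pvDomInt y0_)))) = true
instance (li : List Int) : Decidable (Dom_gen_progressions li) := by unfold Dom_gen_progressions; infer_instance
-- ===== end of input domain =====

-- B replaces A's fused greedy record loop by a running-maximum table plus a separate selection pass (alternative decomposition, same cost).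

-- ===== PORT A =====
-- indices produced by range(...) are always in range, so pyGetD's default is never used
def gen_progressions (li : List Int) : List (List Int) :=
  (PySem.List.pyRange 0 (li.length : Int) 1).foldl (fun res_list i =>
    let comp : Int := PySem.List.pyGetD li i 0
    let st :=
      (PySem.List.pyRange (i + 1) (li.length : Int) 1).foldl
        (fun (st : Int × List Int) j =>
          (fun (st : Int × List Int) (x : Int) =>
            if x > st.1 then (x, st.2 ++ [x]) else st) st (PySem.List.pyGetD li j 0))
        (comp, [comp])
    if st.2.length > 1 then res_list ++ [st.2] else res_list) []

-- ===== PORT B =====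
def gen_progressions_alt (li : List Int) : List (List Int) :=
  (PySem.List.pyRange 0 (li.length : Int) 1).foldl (fun res_list i =>
    let suf := PySem.List.slice li (some i) none
    let acc :=
      (PySem.List.slice suf (some 1) none).foldl
        (fun acc x => acc ++ [max (PySem.List.pyGetD acc (-1) 0) x])
        (PySem.List.slice suf none (some 1))
    let seq :=
      PySem.List.slice suf none (some 1) ++
        ((acc.zip (PySem.List.slice acc (some 1) none)).filterMap
          (fun pq => if pq.2 > pq.1 then some pq.2 else none))
    if seq.length > 1 then res_list ++ [seq] else res_list) []

-- ===== PRECONDITION & SPEC =====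
def Spec_gen_progressions (li : List Int) (out : List (List Int)) : Prop := out = gen_progressions_alt li
instance (li : List Int) (out : List (List Int)) : Decidable (Spec_gen_progressions li out) := by unfold Spec_gen_progressions; infer_instance

-- ===== CLAIM (what is proved, stated in full; the proofs are below) =====
def Claim_equal_gen_progressions : Prop := ∀ (li : List Int), Dom_gen_progressions li → Spec_gen_progressions li (gen_progressions li)

-- ===== LEMMAS AND PROOFS =====

-- running maxima of a list, seeded with c (acc[1:], with acc[0] = c)
def pvRMax : Int → List Int → List Int
  | _, [] => []
  | c, y :: ys => max c y :: pvRMax (max c y) ys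

-- the elements a strict rise of the running max selects
def pvSel : Int → List Int → List Int
  | _, [] => []
  | p, q :: qs => if q > p then q :: pvSel q qs else pvSel q qs

theorem pvGetNegOne (l : List Int) (c : Int) (h : l.getLast? = some c) :
    PySem.List.pyGetD l (-1) 0 = c := by
  cases l with
  | nil => simp at h
  | cons a t =>
    simp [PySem.List.pyGetD, PySem.List.pyGet?, PySem.List.pyIdx?]
    rw [List.getLast?_eq_getElem?] at h
    have : (a :: t).length - 1 < (a :: t).length := by simp
    simpa [List.getElem?_eq_getElem this] using h

theorem pvAccFold (xs : List Int) : ∀ (l : List Int) (c : Int), l.getLast? = some c →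
    xs.foldl (fun acc x => acc ++ [max (PySem.List.pyGetD acc (-1) 0) x]) l
      = l ++ pvRMax c xs := by
  induction xs with
  | nil => intro l c _; simp [pvRMax]
  | cons x xs ih =>
    intro l c h
    have hl : l ≠ [] := by intro he; simp [he] at h
    simp only [List.foldl_cons, pvGetNegOne l c h, pvRMax]
    rw [ih (l ++ [max c x]) (max c x) (by simp)]
    simp

theorem pvZipSel (qs : List Int) : ∀ p : Int,
    (((p :: qs).zip qs).filterMap
      (fun pq : Int × Int => if pq.2 > pq.1 then some pq.2 else none)) = pvSel p qs := by
  induction qs with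
  | nil => intro p; simp [pvSel]
  | cons q qs ih =>
    intro p
    simp only [List.zip_cons_cons, List.filterMap_cons, pvSel]
    by_cases h : p < q <;> simp [h, ih q]

theorem pvAFold (xs : List Int) : ∀ (c : Int) (l : List Int),
    xs.foldl (fun (st : Int × List Int) x => if x > st.1 then (x, st.2 ++ [x]) else st) (c, l)
      = (xs.foldl max c, l ++ pvSel c (pvRMax c xs)) := by
  induction xs with
  | nil => intro c l; simp [pvSel, pvRMax]
  | cons x xs ih =>
    intro c l
    simp only [List.foldl_cons, pvRMax, pvSel]
    by_cases h : x > c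
    · have hm : max c x = x := by omega
      simp only [if_pos h, hm, ih x (l ++ [x])]
      simp
    · have hm : max c x = c := by omega
      simp only [if_neg h, hm]
      rw [ih c l]
      simp

theorem pvBody (li : List Int) (res : List (List Int)) (i : Int)
    (hi : i ∈ PySem.List.pyRange 0 (li.length : Int) 1) :
    (let comp : Int := PySem.List.pyGetD li i 0
     let st :=
      (PySem.List.pyRange (i + 1) (li.length : Int) 1).foldl
        (fun (st : Int × List Int) j =>
          (fun (st : Int × List Int) (x : Int) =>
            if x > st.1 then (x, st.2 ++ [x]) else st) st (PySem.List.pyGetD li j 0))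
        (comp, [comp])
     if st.2.length > 1 then res ++ [st.2] else res)
    =
    (let suf := PySem.List.slice li (some i) none
     let acc :=
      (PySem.List.slice suf (some 1) none).foldl
        (fun acc x => acc ++ [max (PySem.List.pyGetD acc (-1) 0) x])
        (PySem.List.slice suf none (some 1))
     let seq :=
      PySem.List.slice suf none (some 1) ++
        ((acc.zip (PySem.List.slice acc (some 1) none)).filterMap
          (fun pq => if pq.2 > pq.1 then some pq.2 else none))
     if seq.length > 1 then res ++ [seq] else res) := by
  rw [PySem.List.mem_pyRange_one] at hi
  obtain ⟨h0, hlt⟩ := hi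
  have hik : i = (i.toNat : Int) := by omega
  set k := i.toNat with hk
  have hkn : k < li.length := by omega
  obtain ⟨c, rest, hdrop⟩ : ∃ c rest, li.drop k = c :: rest :=
    ⟨_, _, List.drop_eq_getElem_cons hkn⟩
  have hcR : c = li[k] := by
    have := List.drop_eq_getElem_cons hkn
    rw [hdrop] at this; exact (List.cons.injEq _ _ _ _ ▸ this).1
  have hrest : rest = li.drop (k + 1) := by
    have := List.drop_eq_getElem_cons hkn
    rw [hdrop] at this; exact (List.cons.injEq _ _ _ _ ▸ this).2
  -- A side
  have hcomp : PySem.List.pyGetD li i 0 = c := by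
    rw [hik, PySem.List.pyGetD_natCast]
    simp [List.getD, List.getElem?_eq_getElem hkn, hcR]
  have hA : (PySem.List.pyRange (i + 1) (li.length : Int) 1).foldl
        (fun (st : Int × List Int) j =>
          (fun (st : Int × List Int) (x : Int) =>
            if x > st.1 then (x, st.2 ++ [x]) else st) st (PySem.List.pyGetD li j 0))
        (c, [c])
      = (rest.foldl max c, [c] ++ pvSel c (pvRMax c rest)) := by
    rw [PySem.List.foldl_pyRange_pyGetD' li 0 (fun (st : Int × List Int) (x : Int) => if x > st.1 then (x, st.2 ++ [x]) else st) (c, [c]) (by omega)]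
    have h1 : (i + 1).toNat = k + 1 := by omega
    rw [h1, ← hrest, pvAFold]
  -- B side
  have hsuf : PySem.List.slice li (some i) none = c :: rest := by
    rw [PySem.List.slice_from li (by omega), ← hk, hdrop]
  have htake : PySem.List.slice (c :: rest) none (some 1) = [c] := by
    rw [PySem.List.slice_to _ (by norm_num)]; rfl
  have htail : PySem.List.slice (c :: rest) (some 1) none = rest := by
    rw [PySem.List.slice_from_one _]; rfl
  have hacc : rest.foldl
        (fun acc x => acc ++ [max (PySem.List.pyGetD acc (-1) 0) x]) [c]
      = c :: pvRMax c rest := by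
    rw [pvAccFold rest [c] c (by simp)]; simp
  have hacctail : PySem.List.slice (c :: pvRMax c rest) (some 1) none = pvRMax c rest := by
    rw [PySem.List.slice_from_one _]; rfl
  simp only [hcomp, hA, hsuf, htake, htail]
  simp only [hacc, hacctail]
  rw [pvZipSel]

-- ===== VERDICT (by name: the statement is the Claim_ definition above) =====
theorem gen_progressions_spec : Claim_equal_gen_progressions := by
  intro li _
  unfold Spec_gen_progressions gen_progressions gen_progressions_alt
  apply PySem.List.foldl_congr_mem
  intro res i hi
  exact pvBody li res i hi
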